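-- pv_equiv track=rewrite | github.com/ToluAkin/data-structure-and-algorithms | heap-stack/heap-stack.py | addPropertiesToLand
-- ===== SOURCE A (Python) =====
-- def addPropertiesToLand(properties, rows, propertyPerRow) -> None:
--     data = {}
--     item_index = 0
--
--     for row in range(1, rows + 1):
--         row_key = f'row{row}'
--         data[row_key] = []
--
--         for _ in range(propertyPerRow):
--             if item_index < len(properties):
--                 data[row_key].append(properties[item_index])
--                 item_index += 1
--
--     return data
-- ===== SOURCE B (Python) =====
-- def addPropertiesToLand(properties, rows, propertyPerRow):
--     per = max(propertyPerRow, 0)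
--     return {f'row{r}': properties[(r - 1) * per : r * per] for r in range(1, rows + 1)}
-- ===== Notes on version B (the rewrite author's own statement) =====
-- stated objective: simpler
-- what changed: Replaces the stateful nested loop (running item index, one append per grid slot, even for slots past the end of the list) by a one-line dict comprehension that gives each row its slice properties[(r-1)*per : r*per] directly.
import Mathlib
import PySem

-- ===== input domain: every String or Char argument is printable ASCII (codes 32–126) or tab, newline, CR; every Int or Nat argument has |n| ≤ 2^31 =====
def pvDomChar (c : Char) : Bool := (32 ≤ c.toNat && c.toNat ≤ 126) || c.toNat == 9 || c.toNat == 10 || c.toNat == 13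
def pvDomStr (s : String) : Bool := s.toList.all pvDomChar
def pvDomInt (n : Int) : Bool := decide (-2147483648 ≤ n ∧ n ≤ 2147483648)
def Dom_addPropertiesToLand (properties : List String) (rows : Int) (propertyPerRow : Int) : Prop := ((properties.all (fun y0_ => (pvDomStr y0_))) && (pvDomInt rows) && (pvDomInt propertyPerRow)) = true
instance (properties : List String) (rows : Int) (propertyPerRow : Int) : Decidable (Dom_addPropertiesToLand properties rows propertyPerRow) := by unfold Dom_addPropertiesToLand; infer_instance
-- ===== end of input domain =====

-- B replaces A's stateful nested loop (running item index, one append per grid slot) by a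
-- dict comprehension that gives each row its slice of the property list directly (objective: simpler).

-- ===== PORT A =====
-- literal port of A: dict + running item_index; outer loop over rows, inner loop over slots
def addPropertiesToLand (properties : List String) (rows : Int) (propertyPerRow : Int) :
    List (String × List String) :=
  ((PySem.List.pyRange 1 (rows + 1) 1).foldl
    (fun (st : PySem.Dict String (List String) × Int) row =>
      let rowKey := "row" ++ PySem.Int.toStr row
      (PySem.List.pyRange 0 propertyPerRow 1).foldl
        (fun (st2 : PySem.Dict String (List String) × Int) _ =>
          if st2.2 < (properties.length : Int) then
            (st2.1.modify rowKey [] (fun l => l ++ [PySem.List.pyGetD properties st2.2 ""]),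
             st2.2 + 1)
          else st2)
        (st.1.insert rowKey [], st.2))
    (PySem.Dict.empty, 0)).1.items

-- ===== PORT B =====
-- port of Source B's dict comprehension: its keys 'row1'..'rowN' are pairwise distinct, so the dict
-- is (by the type convention) exactly this association list in comprehension order
def addPropertiesToLand_alt (properties : List String) (rows : Int) (propertyPerRow : Int) :
    List (String × List String) :=
  let per := max propertyPerRow 0
  (PySem.List.pyRange 1 (rows + 1) 1).map
    (fun r => ("row" ++ PySem.Int.toStr r,
               PySem.List.slice properties (some ((r - 1) * per)) (some (r * per))))

-- ===== PRECONDITION & SPEC =====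
def Spec_addPropertiesToLand (properties : List String) (rows : Int) (propertyPerRow : Int) (out : List (String × List String)) : Prop := out = addPropertiesToLand_alt properties rows propertyPerRow
instance (properties : List String) (rows : Int) (propertyPerRow : Int) (out : List (String × List String)) : Decidable (Spec_addPropertiesToLand properties rows propertyPerRow out) := by unfold Spec_addPropertiesToLand; infer_instance

-- ===== CLAIM (what is proved, stated in full; the proofs are below) =====
def Claim_equal_addPropertiesToLand : Prop := ∀ (properties : List String) (rows : Int) (propertyPerRow : Int), Dom_addPropertiesToLand properties rows propertyPerRow → Spec_addPropertiesToLand properties rows propertyPerRow (addPropertiesToLand properties rows propertyPerRow)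

-- ===== LEMMAS AND PROOFS =====

-- a foldl that ignores the list elements is an iterate
theorem pvFoldlConst {α β : Type} (f : β → β) (l : List α) (init : β) :
    l.foldl (fun s _ => f s) init = f^[l.length] init := by
  induction l generalizing init with
  | nil => rfl
  | cons x xs ih => simpa [Function.iterate_succ_apply] using ih (f init)

-- Nat.toDigitsCore in terms of Nat.digits (enough fuel, positive input)
theorem pvToDigitsCore_eq : ∀ (f n : Nat) (acc : List Char), 0 < n → n < f →
    Nat.toDigitsCore 10 f n acc = ((Nat.digits 10 n).map Nat.digitChar).reverse ++ acc := by
  intro f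
  induction f with
  | zero => intro n acc h1 h2; omega
  | succ f ih =>
    intro n acc h1 h2
    rw [Nat.toDigitsCore]
    by_cases h : n / 10 = 0
    · have hlt : n < 10 := by omega
      rw [if_pos h, Nat.digits_def' (by norm_num : (1:ℕ) < 10) h1, h]
      simp [Nat.mod_eq_of_lt hlt]
    · rw [if_neg h, ih (n / 10) _ (by omega) (by omega),
        Nat.digits_def' (by norm_num : (1:ℕ) < 10) h1]
      simp

theorem pvDigitChar_inj : ∀ a : Nat, a < 10 → ∀ b : Nat, b < 10 →
    Nat.digitChar a = Nat.digitChar b → a = b := by decide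

theorem pvMapDigitChar_inj : ∀ (l1 l2 : List Nat), (∀ x ∈ l1, x < 10) → (∀ x ∈ l2, x < 10) →
    l1.map Nat.digitChar = l2.map Nat.digitChar → l1 = l2 := by
  intro l1
  induction l1 with
  | nil => intro l2 _ _ h; cases l2 <;> simp_all
  | cons a l1 ih =>
    intro l2 h1 h2 h
    cases l2 with
    | nil => simp_all
    | cons b l2 =>
      simp only [List.map_cons, List.cons.injEq] at h
      have := pvDigitChar_inj a (h1 a (by simp)) b (h2 b (by simp)) h.1
      simp_all [ih l2 (fun x hx => h1 x (by simp [hx])) (fun x hx => h2 x (by simp [hx]))]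

theorem pvToDigits_inj (m n : Nat) (hm : 0 < m) (hn : 0 < n)
    (h : Nat.toDigits 10 m = Nat.toDigits 10 n) : m = n := by
  rw [Nat.toDigits, Nat.toDigits, pvToDigitsCore_eq _ _ _ hm (by omega),
    pvToDigitsCore_eq _ _ _ hn (by omega)] at h
  simp only [List.append_nil, List.reverse_inj] at h
  have := pvMapDigitChar_inj _ _ (fun x hx => Nat.digits_lt_base (by norm_num) hx)
    (fun x hx => Nat.digits_lt_base (by norm_num) hx) h
  exact Nat.digits.injective 10 this

-- distinct positive row numbers give distinct 'row…' keys
theorem pvRowKey_inj (r r' : Int) (hr : 0 < r) (hr' : 0 < r')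
    (h : "row" ++ PySem.Int.toStr r = "row" ++ PySem.Int.toStr r') : r = r' := by
  have h2 := congrArg String.toList h
  simp only [String.toList_append, List.append_cancel_left_eq, PySem.Int.toList_toStr] at h2
  unfold PySem.Int.toChars at h2
  rw [if_neg (by omega), if_neg (by omega)] at h2
  have := pvToDigits_inj r.toNat r'.toNat (by omega) (by omega) h2
  omega

-- one modify on the last (fresh-keyed) entry of a dict
theorem pvDictMod (pre : List (String × List String)) (key : String) (cur : List String)
    (x : String) (hf : ∀ q ∈ pre, q.1 ≠ key) :
    (PySem.Dict.mk (pre ++ [(key, cur)])).modify key [] (fun l => l ++ [x])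
      = PySem.Dict.mk (pre ++ [(key, cur ++ [x])]) := by
  have hfind : pre.find? (fun p => p.1 == key) = none :=
    List.find?_eq_none.2 (fun q hq => by simpa using hf q hq)
  have hcont : (PySem.Dict.mk (pre ++ [(key, cur)])).contains key = true := by
    simp [PySem.Dict.contains]
  have hgetD : (PySem.Dict.mk (pre ++ [(key, cur)])).getD key [] = cur := by
    simp [PySem.Dict.getD, PySem.Dict.get?, List.find?_append, hfind]
  rw [PySem.Dict.modify, hgetD, PySem.Dict.insert, if_pos hcont]
  congr 1
  rw [List.map_append]
  have h1 : pre.map (fun p => if (p.1 == key) = true then (key, cur ++ [x]) else p) = pre.map id :=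
    List.map_congr_left (fun q hq => by rw [if_neg (by simpa using hf q hq)]; rfl)
  rw [h1, List.map_id]
  simp

-- A's inner slot loop, iterated k times on a dict whose last entry carries the fresh key
theorem pvInner (properties : List String) (key : String) :
    ∀ (k : Nat) (pre : List (String × List String)) (cur : List String) (i : Int),
    (∀ q ∈ pre, q.1 ≠ key) → 0 ≤ i → i ≤ (properties.length : Int) →
    (fun (st2 : PySem.Dict String (List String) × Int) =>
        if st2.2 < (properties.length : Int) then
          (st2.1.modify key [] (fun l => l ++ [PySem.List.pyGetD properties st2.2 ""]), st2.2 + 1)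
        else st2)^[k] (PySem.Dict.mk (pre ++ [(key, cur)]), i)
      = (PySem.Dict.mk (pre ++ [(key, cur ++ (properties.drop i.toNat).take k)]),
         min (i + k) (properties.length : Int)) := by
  intro k
  induction k with
  | zero =>
    intro pre cur i hf h0 h1
    simp [min_eq_left h1]
  | succ k ih =>
    intro pre cur i hf h0 h1
    rw [Function.iterate_succ_apply]
    by_cases hlt : i < (properties.length : Int)
    · simp only [if_pos hlt]
      rw [pvDictMod pre key cur _ hf,
        PySem.List.pyGetD_eq_getElem properties "" h0 hlt,
        ih pre _ (i + 1) hf (by omega) (by omega)]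
      have hdrop : properties.drop i.toNat = properties[i.toNat] :: properties.drop (i.toNat + 1) :=
        List.drop_eq_getElem_cons (by omega)
      have h2 : (i + 1).toNat = i.toNat + 1 := by omega
      rw [h2]
      have h3 : cur ++ [properties[i.toNat]] ++ List.take k (List.drop (i.toNat + 1) properties)
          = cur ++ List.take (k + 1) (List.drop i.toNat properties) := by
        rw [hdrop, List.take_succ_cons, List.append_assoc]; rfl
      have h4 : min (i + 1 + (k:Int)) (properties.length : Int)
          = min (i + ((k:Int) + 1)) (properties.length : Int) := by ring_nf
      rw [h3, h4]
      norm_cast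
    · have hi : i = (properties.length : Int) := by omega
      simp only [if_neg hlt]
      rw [ih pre cur i hf h0 h1]
      have : properties.drop i.toNat = [] := List.drop_eq_nil_of_le (by omega)
      rw [this]
      simp
      omega

theorem pvDropMin {α : Type} (l : List α) (a : Nat) : l.drop (min a l.length) = l.drop a := by
  rcases le_total a l.length with h | h
  · rw [min_eq_left h]
  · rw [min_eq_right h, List.drop_length, List.drop_eq_nil_of_le h]

-- A's outer loop invariant over the first n rows
theorem pvOuter (properties : List String) (propertyPerRow : Int) :
    ∀ (n : Nat),
    (PySem.List.pyRange 1 (1 + (n : Int)) 1).foldl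
      (fun (st : PySem.Dict String (List String) × Int) row =>
        let rowKey := "row" ++ PySem.Int.toStr row
        (PySem.List.pyRange 0 propertyPerRow 1).foldl
          (fun (st2 : PySem.Dict String (List String) × Int) _ =>
            if st2.2 < (properties.length : Int) then
              (st2.1.modify rowKey [] (fun l => l ++ [PySem.List.pyGetD properties st2.2 ""]),
               st2.2 + 1)
            else st2)
          (st.1.insert rowKey [], st.2))
      (PySem.Dict.empty, 0)
    = (PySem.Dict.mk ((PySem.List.pyRange 1 (1 + (n : Int)) 1).map
        (fun r => ("row" ++ PySem.Int.toStr r,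
          (properties.drop ((r - 1) * (propertyPerRow.toNat : Int)).toNat).take propertyPerRow.toNat))),
       ((min (n * propertyPerRow.toNat) properties.length : Nat) : Int)) := by
  intro n
  induction n with
  | zero =>
    rw [show (1 : Int) + ((0:Nat):Int) = 1 by rfl]
    rw [PySem.List.pyRange_one_eq_nil (a := 1) (b := 1) (by omega)]
    simp [PySem.Dict.empty]
  | succ n ih =>
    have hcast : (1 : Int) + ((n + 1 : Nat) : Int) = (1 + (n : Int)) + 1 := by push_cast; ring
    rw [hcast, PySem.List.pyRange_one_succ_right (by omega), List.foldl_append, ih,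
      List.map_append]
    simp only [List.foldl_cons, List.foldl_nil, List.map_cons, List.map_nil]
    set key := "row" ++ PySem.Int.toStr (1 + (n : Int)) with hkey
    set prev := (PySem.List.pyRange 1 (1 + (n : Int)) 1).map
        (fun r => ("row" ++ PySem.Int.toStr r,
          (properties.drop ((r - 1) * (propertyPerRow.toNat : Int)).toNat).take propertyPerRow.toNat)) with hprev
    have hfresh : ∀ q ∈ prev, q.1 ≠ key := by
      intro q hq
      rw [hprev] at hq
      obtain ⟨r, hr, rfl⟩ := List.mem_map.1 hq
      rw [PySem.List.mem_pyRange_one] at hr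
      intro hcontra
      have := pvRowKey_inj r (1 + (n : Int)) (by omega) (by omega) hcontra
      omega
    have hcont : (PySem.Dict.mk prev).contains key = false := by
      simp only [PySem.Dict.contains, List.any_eq_false]
      intro q hq
      simpa using hfresh q hq
    have hins : (PySem.Dict.mk prev).insert key [] = PySem.Dict.mk (prev ++ [(key, [])]) := by
      rw [PySem.Dict.insert, hcont]
      simp
    rw [hins]
    rw [pvFoldlConst (fun (st2 : PySem.Dict String (List String) × Int) =>
          if st2.2 < (properties.length : Int) then
            (st2.1.modify key [] (fun l => l ++ [PySem.List.pyGetD properties st2.2 ""]), st2.2 + 1)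
          else st2)]
    rw [PySem.List.length_pyRange_one]
    have hlen : (propertyPerRow - 0).toNat = propertyPerRow.toNat := by omega
    rw [hlen]
    rw [pvInner properties key propertyPerRow.toNat prev []
      ((min (n * propertyPerRow.toNat) properties.length : Nat) : Int) hfresh (by positivity)
      (by exact_mod_cast Nat.cast_le.2 (Nat.min_le_right _ _))]
    have h1 : ((1 + (n : Int)) - 1) * (propertyPerRow.toNat : Int) = ((n * propertyPerRow.toNat : Nat) : Int) := by
      push_cast; ring
    have hch : ([] : List String) ++ (properties.drop ((((min (n * propertyPerRow.toNat) properties.length : Nat)) : Int)).toNat).take propertyPerRow.toNat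
        = (properties.drop (((1 + (n : Int)) - 1) * (propertyPerRow.toNat : Int)).toNat).take propertyPerRow.toNat := by
      rw [h1, Int.toNat_natCast, Int.toNat_natCast, List.nil_append, pvDropMin]
    have hidx : min (((min (n * propertyPerRow.toNat) properties.length : Nat) : Int) + (propertyPerRow.toNat : Int)) (properties.length : Int)
        = (((min ((n + 1) * propertyPerRow.toNat) properties.length : Nat)) : Int) := by
      have hidx_nat : min (min (n * propertyPerRow.toNat) properties.length + propertyPerRow.toNat) properties.length
          = min ((n + 1) * propertyPerRow.toNat) properties.length := by
        rw [Nat.succ_mul]; omega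
      rw [← Nat.cast_add, ← Nat.cast_min, hidx_nat]
    rw [hch, hidx]

-- ===== VERDICT (by name: the statement is the Claim_ definition above) =====
theorem addPropertiesToLand_spec : Claim_equal_addPropertiesToLand := by
  intro properties rows propertyPerRow _
  unfold Spec_addPropertiesToLand addPropertiesToLand addPropertiesToLand_alt
  by_cases hr : rows ≤ 0
  · rw [PySem.List.pyRange_one_eq_nil (a := 1) (b := rows + 1) (by omega)]
    simp [PySem.Dict.empty]
  · have hn : rows + 1 = 1 + ((rows.toNat : Nat) : Int) := by omega
    rw [hn, pvOuter]
    apply List.map_congr_left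
    intro r hmem
    rw [PySem.List.mem_pyRange_one] at hmem
    have hper : max propertyPerRow 0 = ((propertyPerRow.toNat : Int)) := by omega
    have ha : 0 ≤ (r - 1) * ((propertyPerRow.toNat : Int)) :=
      mul_nonneg (by omega) (by positivity)
    have hb : r * ((propertyPerRow.toNat : Int))
        = (r - 1) * ((propertyPerRow.toNat : Int)) + (propertyPerRow.toNat : Int) := by ring
    rw [hper, PySem.List.slice_toNat properties ha (by omega : (0:Int) ≤ r * (propertyPerRow.toNat : Int)), hb]
    have hamt : ((r - 1) * ((propertyPerRow.toNat : Int)) + (propertyPerRow.toNat : Int)).toNat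
        - ((r - 1) * ((propertyPerRow.toNat : Int))).toNat = propertyPerRow.toNat := by omega
    rw [hamt]
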